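-- pv_equiv track=rewrite | github.com/LuizGuzzo/Mestrado | TeoriaComputacao/trab 2/kattis/1.py | check_tilt
-- ===== SOURCE A (Python) =====
-- def check_tilt(mesa): # checar se tem mais X q O (caçando problema de n ta rodando)
--     qX = 0
--     qO = 0
--     for linha in mesa:
--         for celula in linha:
--             if celula == -1: # O
--                 qO += 1
--             if celula == 1: # X
--                 qX += 1
--
--     if -1 <= (qO - qX) <= 1:
--         return False
--     else:
--         return True
-- ===== SOURCE B (Python) =====
-- def check_tilt(mesa):
--     cells = [celula for linha in mesa for celula in linha]
--
--     def bal(lo, hi):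
--         # signed balance (#O - #X) of cells[lo:hi] by divide and conquer
--         if hi - lo == 0:
--             return 0
--         if hi - lo == 1:
--             c = cells[lo]
--             return (c == -1) - (c == 1)
--         mid = (lo + hi) // 2
--         return bal(lo, mid) + bal(mid, hi)
--
--     b = bal(0, len(cells))
--     return b < -1 or 1 < b
-- ===== Notes on version B (the rewrite author's own statement) =====
-- stated objective: alternative
-- what changed: Instead of two counters maintained over nested loops, B flattens the board once and computes a single signed balance (#O - #X) by divide-and-conquer recursion on index ranges, then makes one comparison.
import Mathlib
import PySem

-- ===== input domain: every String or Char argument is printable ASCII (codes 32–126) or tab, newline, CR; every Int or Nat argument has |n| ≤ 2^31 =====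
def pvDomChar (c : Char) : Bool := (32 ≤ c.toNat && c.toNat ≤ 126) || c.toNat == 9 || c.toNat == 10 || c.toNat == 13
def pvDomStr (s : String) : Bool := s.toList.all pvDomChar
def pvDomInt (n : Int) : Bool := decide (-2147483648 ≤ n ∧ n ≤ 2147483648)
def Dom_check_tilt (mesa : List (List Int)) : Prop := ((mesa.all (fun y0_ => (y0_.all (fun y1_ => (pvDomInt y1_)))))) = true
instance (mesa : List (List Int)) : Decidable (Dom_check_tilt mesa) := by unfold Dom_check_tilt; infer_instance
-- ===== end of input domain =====

-- B flattens the board once and computes one signed balance (#O - #X) by divide-and-conquer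
-- over index ranges instead of A's two counters over nested loops (objective: alternative).

-- ===== PORT A =====
-- literal port of A: nested loops maintaining the two counters (qX, qO)
def check_tilt (mesa : List (List Int)) : Bool :=
  let p := mesa.foldl (fun (p : Int × Int) linha =>
    linha.foldl (fun (p : Int × Int) celula =>
      let p := if celula = -1 then (p.1, p.2 + 1) else p
      if celula = 1 then (p.1 + 1, p.2) else p) p) (0, 0)
  if -1 ≤ p.2 - p.1 ∧ p.2 - p.1 ≤ 1 then false else true

-- ===== PORT B =====
-- divide-and-conquer balance of cells[lo:hi]; cells.getD lo 0 is exact here since every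
-- call from check_tilt_alt keeps lo < hi <= cells.length (Python's cells[lo] never errors);
-- fuel = hi - lo only makes the recursion structural (each recursive range is strictly smaller)
def balF (cells : List Int) : Nat → Nat → Nat → Int
  | 0, _, _ => 0
  | fuel + 1, lo, hi =>
    if hi - lo = 0 then 0
    else if hi - lo = 1 then
      let c := cells.getD lo 0
      (if c = -1 then (1 : Int) else 0) - (if c = 1 then (1 : Int) else 0)
    else
      let mid := (lo + hi) / 2
      balF cells fuel lo mid + balF cells fuel mid hi

def bal (cells : List Int) (lo hi : Nat) : Int := balF cells (hi - lo) lo hi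

def check_tilt_alt (mesa : List (List Int)) : Bool :=
  let cells := mesa.flatMap (fun linha => linha)
  let b := bal cells 0 cells.length
  decide (b < -1 ∨ 1 < b)

-- ===== PRECONDITION & SPEC =====
def Spec_check_tilt (mesa : List (List Int)) (out : Bool) : Prop := out = check_tilt_alt mesa
instance (mesa : List (List Int)) (out : Bool) : Decidable (Spec_check_tilt mesa out) := by unfold Spec_check_tilt; infer_instance

-- ===== CLAIM (what is proved, stated in full; the proofs are below) =====
def Claim_equal_check_tilt : Prop := ∀ (mesa : List (List Int)), Dom_check_tilt mesa → Spec_check_tilt mesa (check_tilt mesa)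

-- ===== LEMMAS AND PROOFS =====

def pySign (c : Int) : Int := (if c = -1 then (1 : Int) else 0) - (if c = 1 then (1 : Int) else 0)

-- inner loop of A counts 1s and -1s of the row
theorem inner_count (l : List Int) (p : Int × Int) :
    l.foldl (fun (p : Int × Int) celula =>
      let p := if celula = -1 then (p.1, p.2 + 1) else p
      if celula = 1 then (p.1 + 1, p.2) else p) p
    = (p.1 + l.count 1, p.2 + l.count (-1)) := by
  induction l generalizing p with
  | nil => simp
  | cons x xs ih =>
    simp only [List.foldl_cons, List.count_cons, ih]
    by_cases h1 : x = -1 <;> by_cases h2 : x = 1 <;>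
      simp [h1, h2, Prod.ext_iff] <;> ring_nf

-- outer loop of A accumulates the total counts
theorem outer_count (mesa : List (List Int)) (p : Int × Int) :
    mesa.foldl (fun (p : Int × Int) linha =>
      linha.foldl (fun (p : Int × Int) celula =>
        let p := if celula = -1 then (p.1, p.2 + 1) else p
        if celula = 1 then (p.1 + 1, p.2) else p) p) p
    = (p.1 + ((mesa.map (fun l => (l.count 1 : Int))).sum),
       p.2 + ((mesa.map (fun l => (l.count (-1) : Int))).sum)) := by
  induction mesa generalizing p with
  | nil => simp
  | cons l ls ih =>
    rw [List.foldl_cons, inner_count, ih]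
    simp only [List.map_cons, List.sum_cons, Prod.ext_iff]
    refine ⟨by ring, by ring⟩

-- per-row: sum of signs = count(-1) - count(1)
theorem sign_sum_row (l : List Int) :
    (l.map pySign).sum = (l.count (-1) : Int) - (l.count 1 : Int) := by
  induction l with
  | nil => simp
  | cons x xs ih =>
    simp only [List.map_cons, List.sum_cons, List.count_cons, ih, pySign]
    by_cases h1 : x = -1 <;> by_cases h2 : x = 1 <;> simp [h1, h2] <;> ring

-- balF computes the sign-sum of the slice whenever the fuel covers the range
theorem balF_eq (fuel : Nat) : ∀ (cells : List Int) (lo hi : Nat), hi - lo ≤ fuel → hi ≤ cells.length →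
    balF cells fuel lo hi = (((cells.drop lo).take (hi - lo)).map pySign).sum := by
  induction fuel with
  | zero =>
    intro cells lo hi hn hlen
    have h0 : hi - lo = 0 := by omega
    simp [balF, h0]
  | succ fuel ih =>
    intro cells lo hi hn hlen
    rw [balF]
    by_cases h0 : hi - lo = 0
    · simp [h0]
    · rw [if_neg h0]
      by_cases h1 : hi - lo = 1
      · rw [if_pos h1, h1]
        have hlo : lo < cells.length := by omega
        rw [List.drop_eq_getElem_cons hlo]
        simp only [List.take_succ_cons, List.take_zero, List.map_cons, List.map_nil,
          List.sum_cons, List.sum_nil, add_zero, pySign, List.getD_eq_getElem?_getD,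
          List.getElem?_eq_getElem hlo, Option.getD_some]
      · rw [if_neg h1]
        dsimp only
        rw [ih cells lo ((lo + hi) / 2) (by omega) (by omega),
            ih cells ((lo + hi) / 2) hi (by omega) hlen]
        have hsplit : hi - lo = ((lo + hi) / 2 - lo) + (hi - (lo + hi) / 2) := by omega
        rw [hsplit, List.take_add, List.map_append, List.sum_append]
        congr 2
        rw [List.drop_drop]
        congr 3
        omega

theorem bal_eq (cells : List Int) (lo hi : Nat) (hlen : hi ≤ cells.length) :
    bal cells lo hi = (((cells.drop lo).take (hi - lo)).map pySign).sum :=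
  balF_eq (hi - lo) cells lo hi le_rfl hlen

-- total sign-sum of the flattened board = per-row counts difference
theorem sign_sum_flat (mesa : List (List Int)) :
    ((mesa.flatMap (fun linha => linha)).map pySign).sum
      = ((mesa.map (fun l => (l.count (-1) : Int))).sum) - ((mesa.map (fun l => (l.count 1 : Int))).sum) := by
  induction mesa with
  | nil => simp
  | cons l ls ih =>
    simp only [List.flatMap_cons, List.map_append, List.sum_append, ih, List.map_cons,
      List.sum_cons, sign_sum_row]
    ring

-- ===== VERDICT (by name: the statement is the Claim_ definition above) =====
theorem check_tilt_spec : Claim_equal_check_tilt := by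
  intro mesa _
  unfold Spec_check_tilt check_tilt check_tilt_alt
  dsimp only
  rw [outer_count, bal_eq _ _ _ le_rfl]
  simp only [Nat.sub_zero, List.drop_zero, List.take_length, zero_add, sign_sum_flat]
  set a := ((mesa.map (fun l => (l.count (-1) : Int))).sum)
  set b := ((mesa.map (fun l => (l.count 1 : Int))).sum)
  by_cases h : -1 ≤ a - b ∧ a - b ≤ 1
  · rw [if_pos h]; simp; omega
  · rw [if_neg h]; simp; omega
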